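-- pv_equiv track=rewrite | github.com/messiahbendavid/BeyondPriceAndTimeProof | app.py | count_stasis_patterns
-- ===== SOURCE A (Python) =====
-- from collections import defaultdict
--
-- def count_stasis_patterns(seq):
--     c=defaultdict(int)
--     if len(seq)<2: return dict(c)
--     cur=1
--     for i in range(1,len(seq)):
--         if seq[i]!=seq[i-1]: cur+=1
--         else:
--             if cur>=2: c[cur]+=1
--             cur=1
--     if cur>=2: c[cur]+=1
--     return dict(c)
-- ===== SOURCE B (Python) =====
-- def count_stasis_patterns(seq):
--     n = len(seq)
--     breaks = [i for i in range(1, n) if seq[i] == seq[i - 1]]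
--     bounds = [0] + breaks + [n]
--     c = {}
--     for a, b in zip(bounds, bounds[1:]):
--         L = b - a
--         if L >= 2:
--             c[L] = c.get(L, 0) + 1
--     return c
-- ===== Notes on version B (the rewrite author's own statement) =====
-- stated objective: alternative
-- what changed: B first collects the break positions (indices where adjacent elements are equal) into a list, forms boundaries [0]+breaks+[n], and derives each segment length by subtracting consecutive boundaries, counting lengths >= 2 in a plain dict; A instead scans with an incremental reset-counter and bumps a defaultdict inline.
import Mathlib
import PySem

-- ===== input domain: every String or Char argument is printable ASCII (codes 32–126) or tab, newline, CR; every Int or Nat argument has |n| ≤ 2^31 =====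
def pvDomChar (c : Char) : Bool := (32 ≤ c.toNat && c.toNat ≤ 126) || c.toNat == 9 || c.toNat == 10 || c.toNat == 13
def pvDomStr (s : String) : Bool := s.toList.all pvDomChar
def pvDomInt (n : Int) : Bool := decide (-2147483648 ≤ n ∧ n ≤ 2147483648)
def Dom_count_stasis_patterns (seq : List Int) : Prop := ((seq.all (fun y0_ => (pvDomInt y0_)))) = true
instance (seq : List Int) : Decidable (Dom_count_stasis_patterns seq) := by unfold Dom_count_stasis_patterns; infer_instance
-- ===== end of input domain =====

-- B replaces A's incremental reset-counter with a break-index list: it collects the positions where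
-- adjacent elements are equal, forms boundaries [0]+breaks+[n], and counts each boundary difference ≥ 2
-- (objective: alternative decomposition, same O(n) cost).

-- ===== PORT A =====
-- indices i and i-1 are always in range (1 ≤ i < len seq), so pyGetD with default 0 is exact
def count_stasis_patterns (seq : List Int) : List (Int × Int) :=
  let c : PySem.Dict Int Int := PySem.Dict.empty
  if seq.length < 2 then c.items
  else
    let st := (PySem.List.pyRange 1 (seq.length : Int) 1).foldl
      (fun (st : PySem.Dict Int Int × Int) i =>
        if PySem.List.pyGetD seq i 0 ≠ PySem.List.pyGetD seq (i - 1) 0 then (st.1, st.2 + 1)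
        else ((if st.2 ≥ 2 then st.1.modify st.2 0 (· + 1) else st.1), 1))
      (c, 1)
    (if st.2 ≥ 2 then st.1.modify st.2 0 (· + 1) else st.1).items

-- ===== PORT B =====
-- indices i and i-1 are always in range (1 ≤ i < len seq), so pyGetD with default 0 is exact
def count_stasis_patterns_alt (seq : List Int) : List (Int × Int) :=
  let n : Int := seq.length
  let breaks := (PySem.List.pyRange 1 n 1).filter
    (fun i => PySem.List.pyGetD seq i 0 == PySem.List.pyGetD seq (i - 1) 0)
  let bounds := 0 :: (breaks ++ [n])
  let c := (bounds.zip bounds.tail).foldl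
    (fun (c : PySem.Dict Int Int) p =>
      let L := p.2 - p.1
      if L ≥ 2 then c.insert L (c.getD L 0 + 1) else c)
    PySem.Dict.empty
  c.items

-- ===== PRECONDITION & SPEC =====
def Spec_count_stasis_patterns (seq : List Int) (out : List (Int × Int)) : Prop := out = count_stasis_patterns_alt seq
instance (seq : List Int) (out : List (Int × Int)) : Decidable (Spec_count_stasis_patterns seq out) := by unfold Spec_count_stasis_patterns; infer_instance

-- ===== CLAIM (what is proved, stated in full; the proofs are below) =====
def Claim_equal_count_stasis_patterns : Prop := ∀ (seq : List Int), Dom_count_stasis_patterns seq → Spec_count_stasis_patterns seq (count_stasis_patterns seq)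

-- ===== LEMMAS AND PROOFS =====

-- A's loop body and finaliser, named for the proofs (definitionally the lambdas inside the port)
def pvStepA (seq : List Int) (st : PySem.Dict Int Int × Int) (i : Int) : PySem.Dict Int Int × Int :=
  if PySem.List.pyGetD seq i 0 ≠ PySem.List.pyGetD seq (i - 1) 0 then (st.1, st.2 + 1)
  else ((if st.2 ≥ 2 then st.1.modify st.2 0 (· + 1) else st.1), 1)

def pvFinish (st : PySem.Dict Int Int × Int) : PySem.Dict Int Int :=
  if st.2 ≥ 2 then st.1.modify st.2 0 (· + 1) else st.1

-- B's loop body, named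
def pvStepB (c : PySem.Dict Int Int) (p : Int × Int) : PySem.Dict Int Int :=
  let L := p.2 - p.1
  if L ≥ 2 then c.insert L (c.getD L 0 + 1) else c

-- B's fold over zipped boundary pairs, as a fold over the boundary list itself
def pvPairFold (c : PySem.Dict Int Int) : List Int → PySem.Dict Int Int
  | x :: y :: tl => pvPairFold (pvStepB c (x, y)) (y :: tl)
  | _ => c

lemma pvZipFold (l : List Int) : ∀ (x : Int) (c : PySem.Dict Int Int),
    ((x :: l).zip l).foldl pvStepB c = pvPairFold c (x :: l) := by
  induction l with
  | nil => intro x c; rfl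
  | cons y tl ih => intro x c; simpa [List.zip, pvPairFold] using ih y (pvStepB c (x, y))

-- defaultdict bump (modify) equals B's get/insert bump
lemma pvBumpEq (d : PySem.Dict Int Int) (k : Int) :
    d.modify k 0 (· + 1) = d.insert k (d.getD k 0 + 1) := by
  apply PySem.Dict.ext
  simp [PySem.Dict.modify, PySem.Dict.insert, PySem.Dict.getD, PySem.Dict.get?]

def pvBreakPred (seq : List Int) (i : Int) : Bool :=
  PySem.List.pyGetD seq i 0 == PySem.List.pyGetD seq (i - 1) 0

-- loop invariant: A's fold from index a with counter cur = a - s (s = start of the current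
-- segment, no break strictly between s and a) finishes like B's boundary fold from s
lemma pvMain (seq : List Int) : ∀ (m : Nat) (a s cur : Int) (c : PySem.Dict Int Int),
    a = (seq.length : Int) - m → 1 ≤ a → s < a → cur = a - s →
    pvFinish ((PySem.List.pyRange a (seq.length : Int) 1).foldl (pvStepA seq) (c, cur))
      = pvPairFold c (s :: ((PySem.List.pyRange a (seq.length : Int) 1).filter (pvBreakPred seq)
          ++ [(seq.length : Int)])) := by
  intro m
  induction m with
  | zero =>
    intro a s cur c ha h1 hs hcur
    have : a = (seq.length : Int) := by omega
    subst this
    rw [PySem.List.pyRange_one_eq_nil (le_refl _)]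
    simp [pvFinish, pvPairFold, pvStepB, pvBumpEq, hcur]
  | succ m ih =>
    intro a s cur c ha h1 hs hcur
    have hlt : a < (seq.length : Int) := by omega
    rw [PySem.List.pyRange_one_cons hlt]
    by_cases h : PySem.List.pyGetD seq a 0 = PySem.List.pyGetD seq (a - 1) 0
    · -- break at a: the counter resets and a becomes a boundary
      have hstep : pvStepA seq (c, cur) a
          = ((if cur ≥ 2 then c.modify cur 0 (· + 1) else c), 1) := by
        simp [pvStepA, h]
      have hb : pvBreakPred seq a = true := by simp [pvBreakPred, h]
      simp only [List.foldl_cons, List.filter_cons, hstep, hb, if_pos]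
      rw [ih (a + 1) a 1 _ (by omega) (by omega) (by omega) (by omega)]
      show pvPairFold _ (a :: _) = pvPairFold c (s :: a :: _)
      simp only [pvPairFold, pvStepB, pvBumpEq, hcur, List.append_eq]
    · -- no break: the counter advances
      have hstep : pvStepA seq (c, cur) a = (c, cur + 1) := by
        simp [pvStepA, h]
      have hb : pvBreakPred seq a = false := by simp [pvBreakPred, h]
      simp only [List.foldl_cons, List.filter_cons, hstep, hb, Bool.false_eq_true, if_false]
      exact ih (a + 1) s (cur + 1) c (by omega) (by omega) (by omega) (by omega)

-- the ports, rewritten through the named helpers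
lemma pvA_eq (seq : List Int) (h : ¬ seq.length < 2) :
    count_stasis_patterns seq
      = (pvFinish ((PySem.List.pyRange 1 (seq.length : Int) 1).foldl (pvStepA seq)
          (PySem.Dict.empty, 1))).items := by
  unfold count_stasis_patterns
  rw [if_neg h]
  rfl

lemma pvB_eq (seq : List Int) :
    count_stasis_patterns_alt seq
      = (pvPairFold PySem.Dict.empty
          (0 :: ((PySem.List.pyRange 1 (seq.length : Int) 1).filter (pvBreakPred seq)
            ++ [(seq.length : Int)]))).items := by
  unfold count_stasis_patterns_alt
  simp only [List.tail_cons]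
  exact congrArg PySem.Dict.items (pvZipFold _ 0 PySem.Dict.empty)

-- ===== VERDICT (by name: the statement is the Claim_ definition above) =====
theorem count_stasis_patterns_spec : Claim_equal_count_stasis_patterns := by
  intro seq _
  show count_stasis_patterns seq = count_stasis_patterns_alt seq
  by_cases hn : seq.length < 2
  · -- lengths 0 and 1: the single short segment is never counted on either side
    interval_cases h : seq.length
    · obtain rfl : seq = [] := List.length_eq_zero_iff.mp h
      rfl
    · obtain ⟨x, rfl⟩ := List.length_eq_one_iff.mp h
      rfl
  · rw [pvA_eq seq hn, pvB_eq seq]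
    rw [pvMain seq (seq.length - 1) 1 0 1 PySem.Dict.empty (by omega)
      (by omega) (by omega) (by omega)]
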